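-- pv_equiv track=rewrite | github.com/TaitA2/adventofcode | day_12/python/part_1.py | get_measurements
-- ===== SOURCE A (Python) =====
-- def get_measurements(map):
--     measurements = {}
--     for i in range(len(map)):
--         for j in range(len(map[i])):
--             char = map[i][j]
--             perim = 0
--             if i == 0 or map[i - 1][j] != char:
--                 perim += 1
--             if i == len(map) - 1 or map[i + 1][j] != char:
--                 perim += 1
--             if j == 0 or map[i][j - 1] != char:
--                 perim += 1
--             if j == len(map[i]) - 1 or map[i][j + 1] != char:
--                 perim += 1
--             if char not in measurements:
--                 measurements[char] = [0, 0]
--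
--             measurements[char][0] += perim
--             measurements[char][1] += 1
--
--     return measurements
-- ===== SOURCE B (Python) =====
-- def get_measurements(map):
--     measurements = {}
--     for i, line in enumerate(map):
--         for j, char in enumerate(line):
--             delta = 4
--             if j + 1 < len(line) and line[j + 1] == char:
--                 delta -= 2
--             if i + 1 < len(map) and map[i + 1][j] == char:
--                 delta -= 2
--             if char not in measurements:
--                 measurements[char] = [0, 0]
--             measurements[char][0] += delta
--             measurements[char][1] += 1
--     return measurements
-- ===== Notes on version B (the rewrite author's own statement) =====
-- stated objective: alternative
-- what changed: B replaces A's four per-cell boundary/neighbour tests with the shared-edge identity perimeter = 4*area - 2*(interior same-char adjacencies): one enumerate pass that checks only the right and down neighbour of each cell and subtracts 2 per matching shared edge.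
import Mathlib
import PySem

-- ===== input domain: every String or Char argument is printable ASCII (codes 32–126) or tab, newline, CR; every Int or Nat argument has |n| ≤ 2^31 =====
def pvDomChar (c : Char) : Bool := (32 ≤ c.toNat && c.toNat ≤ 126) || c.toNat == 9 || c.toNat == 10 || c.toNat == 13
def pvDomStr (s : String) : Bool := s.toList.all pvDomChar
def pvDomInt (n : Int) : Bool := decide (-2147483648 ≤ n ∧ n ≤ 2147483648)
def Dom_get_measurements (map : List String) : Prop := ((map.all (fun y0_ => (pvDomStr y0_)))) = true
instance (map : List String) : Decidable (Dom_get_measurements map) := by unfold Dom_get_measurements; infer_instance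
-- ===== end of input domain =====

-- B replaces A's four per-cell boundary checks by the shared-edge identity
-- perimeter = 4*area - 2*(interior same-char adjacencies), probing only the right and
-- down neighbour of each cell.

-- ===== PORT A =====
def get_measurements (map : List String) : List (String × List Int) :=
  let measurements : PySem.Dict String (List Int) := PySem.Dict.empty
  let measurements := (PySem.List.pyRange 0 (map.length : Int)).foldl (fun measurements i =>
    let row := (PySem.List.pyGetD map i "").toList
    (PySem.List.pyRange 0 (row.length : Int)).foldl (fun measurements j =>
      let char := PySem.List.pyGetD row j ' '
      let perim : Int := 0
      let perim := if i = 0 ∨ PySem.List.pyGetD (PySem.List.pyGetD map (i - 1) "").toList j ' ' ≠ char then perim + 1 else perim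
      let perim := if i = (map.length : Int) - 1 ∨ PySem.List.pyGetD (PySem.List.pyGetD map (i + 1) "").toList j ' ' ≠ char then perim + 1 else perim
      let perim := if j = 0 ∨ PySem.List.pyGetD row (j - 1) ' ' ≠ char then perim + 1 else perim
      let perim := if j = (row.length : Int) - 1 ∨ PySem.List.pyGetD row (j + 1) ' ' ≠ char then perim + 1 else perim
      let key := String.ofList [char]
      let measurements := if measurements.contains key then measurements else measurements.insert key [0, 0]
      let measurements := measurements.modify key [] (fun v => [v.getD 0 0 + perim, v.getD 1 0])
      measurements.modify key [] (fun v => [v.getD 0 0, v.getD 1 0 + 1])) measurements) measurements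
  measurements.items

-- ===== PORT B =====
def get_measurements_alt (map : List String) : List (String × List Int) :=
  let measurements : PySem.Dict String (List Int) := PySem.Dict.empty
  let measurements := (PySem.List.enumerate map).foldl (fun measurements p =>
    let i := p.1
    let line := p.2.toList
    (PySem.List.enumerate line).foldl (fun measurements q =>
      let j := q.1
      let char := q.2
      let delta : Int := 4
      let delta := if j + 1 < (line.length : Int) ∧ PySem.List.pyGetD line (j + 1) ' ' = char then delta - 2 else delta
      let next := (PySem.List.pyGetD map (i + 1) "").toList
      let delta := if i + 1 < (map.length : Int) ∧ PySem.List.pyGetD next j ' ' = char then delta - 2 else delta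
      let key := String.ofList [char]
      let measurements := if measurements.contains key then measurements else measurements.insert key [0, 0]
      let measurements := measurements.modify key [] (fun v => [v.getD 0 0 + delta, v.getD 1 0])
      measurements.modify key [] (fun v => [v.getD 0 0, v.getD 1 0 + 1])) measurements) measurements
  measurements.items

-- ===== PRECONDITION & SPEC =====
-- Pre_ excludes jagged grids (two consecutive rows of different length), on which A
-- raises IndexError while probing a vertical neighbour.
def Pre_get_measurements (map : List String) : Prop :=
  List.IsChain (fun a b => a.toList.length = b.toList.length) map
instance (map : List String) : Decidable (Pre_get_measurements map) := by unfold Pre_get_measurements; infer_instance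

def pvWitness_get_measurements : List String := ["ab", "ba"]

def Spec_get_measurements (map : List String) (out : List (String × List Int)) : Prop := out = get_measurements_alt map
instance (map : List String) (out : List (String × List Int)) : Decidable (Spec_get_measurements map out) := by unfold Spec_get_measurements; infer_instance

-- ===== CLAIM (what is proved, stated in full; the proofs are below) =====
def Claim_equal_get_measurements : Prop := ∀ (map : List String), Dom_get_measurements map → Pre_get_measurements map → Spec_get_measurements map (get_measurements map)


-- ===== LEMMAS AND PROOFS =====

def pvA (m : List String) (i j : Nat) : Char := ((m.getD i "").toList).getD j ' '

def pvW (m : List String) (i : Nat) : Nat := (m.getD i "").toList.length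

def pvUpd (d : PySem.Dict String (List Int)) (k : String) (p : Int) : PySem.Dict String (List Int) :=
  d.insert k [(d.getD k [0, 0]).getD 0 0 + p, (d.getD k [0, 0]).getD 1 0 + 1]

def pvPerimA (m : List String) (i j : Nat) : Int :=
  (if i = 0 ∨ pvA m (i - 1) j ≠ pvA m i j then (1:Int) else 0)
  + (if i = m.length - 1 ∨ pvA m (i + 1) j ≠ pvA m i j then 1 else 0)
  + (if j = 0 ∨ pvA m i (j - 1) ≠ pvA m i j then 1 else 0)
  + (if j = pvW m i - 1 ∨ pvA m i (j + 1) ≠ pvA m i j then 1 else 0)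

def pvEvents (m : List String) (f : List String → Nat → Nat → Int) : List (String × Int) :=
  (List.range m.length).flatMap (fun i =>
    (List.range (pvW m i)).map (fun j => (String.ofList [pvA m i j], f m i j)))

def pvDfold (evs : List (String × Int)) : PySem.Dict String (List Int) :=
  evs.foldl (fun d e => pvUpd d e.1 e.2) PySem.Dict.empty

theorem pvStep_eq (d : PySem.Dict String (List Int)) (k : String) (p : Int) :
    (((if d.contains k then d else d.insert k [0, 0]).modify k []
        (fun v => [v.getD 0 0 + p, v.getD 1 0])).modify k []
        (fun v => [v.getD 0 0, v.getD 1 0 + 1])) = pvUpd d k p := by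
  by_cases h : d.contains k = true
  · obtain ⟨v, hv⟩ : ∃ v, d.get? k = some v := by
      have h2 := PySem.Dict.contains_eq_isSome_get? d k
      rw [h] at h2; exact Option.isSome_iff_exists.mp h2.symm
    simp [pvUpd, h, PySem.Dict.modify, PySem.Dict.getD_of_get?_eq_some d [] hv,
      PySem.Dict.getD_of_get?_eq_some d [0,0] hv,
      PySem.Dict.getD_insert_self, PySem.Dict.insert_insert_self]
  · simp [pvUpd, h, PySem.Dict.modify, PySem.Dict.getD_insert_self,
      PySem.Dict.insert_insert_self,
      PySem.Dict.getD_of_not_contains d _ (by simpa using h)]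

theorem pvPortA_eq (map : List String) :
    get_measurements map = (pvDfold (pvEvents map pvPerimA)).items := by
  unfold get_measurements pvDfold pvEvents
  rw [List.foldl_flatMap]
  refine congrArg PySem.Dict.items ?_
  rw [PySem.List.pyRange_zero_natCast, List.foldl_map]
  apply PySem.List.foldl_congr_mem
  intro d i hi
  rw [List.mem_range] at hi
  rw [List.foldl_map]
  dsimp only
  simp only [PySem.List.pyGetD_natCast]
  rw [PySem.List.pyRange_zero_natCast, List.foldl_map]
  apply PySem.List.foldl_congr_mem
  intro d j hj
  rw [List.mem_range] at hj
  dsimp only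
  simp only [PySem.List.pyGetD_natCast]
  rw [pvStep_eq]
  have key : ∀ (c1 c2 : Prop) (a b a' b' : Char), (c1 ↔ c2) → (¬ c1 → a = a') → b = b' →
      ((c1 ∨ a ≠ b) ↔ (c2 ∨ a' ≠ b')) := by
    intro c1 c2 a b a' b' h hab hb
    by_cases hc : c1
    · exact iff_of_true (Or.inl hc) (Or.inl (h.mp hc))
    · rw [hab hc, hb]; exact or_congr h Iff.rfl
  have e1 : ((i:Int) = 0 ∨ (PySem.List.pyGetD map ((i:Int) - 1) "").toList.getD j ' ' ≠ (map.getD i "").toList.getD j ' ')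
      ↔ (i = 0 ∨ pvA map (i - 1) j ≠ pvA map i j) := by
    refine key _ _ _ _ _ _ (by omega) (fun hc => ?_) rfl
    obtain ⟨n, rfl⟩ : ∃ n, i = n + 1 := ⟨i - 1, by omega⟩
    rw [show ((((n+1:Nat)):Int) - 1) = ((n:Nat):Int) from by push_cast; ring,
       PySem.List.pyGetD_natCast]
    rfl
  have e2 : ((i:Int) = (map.length:Int) - 1 ∨ (PySem.List.pyGetD map ((i:Int) + 1) "").toList.getD j ' ' ≠ (map.getD i "").toList.getD j ' ')
      ↔ (i = map.length - 1 ∨ pvA map (i + 1) j ≠ pvA map i j) := by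
    refine key _ _ _ _ _ _ (by omega) (fun _ => ?_) rfl
    rw [show (((i:Nat):Int) + 1) = (((i+1:Nat)):Int) from by push_cast; ring,
       PySem.List.pyGetD_natCast]
    rfl
  have e3 : ((j:Int) = 0 ∨ PySem.List.pyGetD (map.getD i "").toList ((j:Int) - 1) ' ' ≠ (map.getD i "").toList.getD j ' ')
      ↔ (j = 0 ∨ pvA map i (j - 1) ≠ pvA map i j) := by
    refine key _ _ _ _ _ _ (by omega) (fun hc => ?_) rfl
    obtain ⟨m, rfl⟩ : ∃ m, j = m + 1 := ⟨j - 1, by omega⟩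
    rw [show ((((m+1:Nat)):Int) - 1) = ((m:Nat):Int) from by push_cast; ring,
       PySem.List.pyGetD_natCast]
    rfl
  have e4 : ((j:Int) = ((map.getD i "").toList.length:Int) - 1 ∨ PySem.List.pyGetD (map.getD i "").toList ((j:Int) + 1) ' ' ≠ (map.getD i "").toList.getD j ' ')
      ↔ (j = pvW map i - 1 ∨ pvA map i (j + 1) ≠ pvA map i j) := by
    refine key _ _ _ _ _ _ (by unfold pvW; omega) (fun _ => ?_) rfl
    rw [show (((j:Nat):Int) + 1) = (((j+1:Nat)):Int) from by push_cast; ring,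
       PySem.List.pyGetD_natCast]
    rfl
  congr 1
  simp only [e1, e2, e3, e4, pvPerimA]
  split_ifs <;> norm_num

def pvDeltaB (m : List String) (i j : Nat) : Int :=
  4 - (if j + 1 < pvW m i ∧ pvA m i (j + 1) = pvA m i j then (2:Int) else 0)
    - (if i + 1 < m.length ∧ pvA m (i + 1) j = pvA m i j then 2 else 0)

theorem pvEnum_eq {α : Type} (dflt : α) : ∀ (xs : List α) (s : Nat),
    PySem.List.enumerate xs (s : Int) =
      (List.range xs.length).map (fun t => (((s + t : Nat) : Int), xs.getD t dflt)) := by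
  intro xs
  induction xs with
  | nil => intro s; rfl
  | cons x t ih =>
    intro s
    show ((s : Int), x) :: PySem.List.enumerate t ((s : Int) + 1) = _
    rw [show ((s : Int) + 1) = ((s + 1 : Nat) : Int) from by push_cast; ring, ih (s + 1)]
    simp only [List.length_cons, List.range_succ_eq_map, List.map_cons, List.map_map,
      Function.comp_def]
    refine congrArg₂ _ (by simp) (List.map_congr_left fun k _ => ?_)
    simp [Nat.succ_eq_add_one]
    omega

theorem pvPortB_eq (map : List String) :
    get_measurements_alt map = (pvDfold (pvEvents map pvDeltaB)).items := by
  unfold get_measurements_alt pvDfold pvEvents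
  rw [List.foldl_flatMap]
  refine congrArg PySem.Dict.items ?_
  rw [show PySem.List.enumerate map = PySem.List.enumerate map ((0:Nat):Int) from rfl,
    pvEnum_eq "" map 0, List.foldl_map]
  apply PySem.List.foldl_congr_mem
  intro d i hi
  rw [List.mem_range] at hi
  rw [List.foldl_map]
  dsimp only
  rw [show PySem.List.enumerate (map.getD i "").toList = PySem.List.enumerate (map.getD i "").toList ((0:Nat):Int) from rfl,
    pvEnum_eq ' ' _ 0, List.foldl_map]
  apply PySem.List.foldl_congr_mem
  intro d j hj
  rw [List.mem_range] at hj
  dsimp only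
  simp only [Nat.zero_add]
  rw [pvStep_eq]
  rw [show (((j:Nat):Int) + 1) = (((j+1:Nat)):Int) from by push_cast; ring,
      show (((i:Nat):Int) + 1) = (((i+1:Nat)):Int) from by push_cast; ring]
  simp only [PySem.List.pyGetD_natCast, Nat.cast_lt]
  congr 1
  simp only [pvDeltaB, pvW, pvA]
  split_ifs <;> norm_num

def pvS (evs : List (String × Int)) (k : String) : Int :=
  (evs.map (fun e => if e.1 = k then e.2 else 0)).sum

theorem pvS_append (l : List (String × Int)) (e : String × Int) (k : String) :
    pvS (l ++ [e]) k = pvS l k + (if e.1 = k then e.2 else 0) := by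
  simp [pvS]

theorem pvS_zero (l : List (String × Int)) (k : String) (h : k ∉ l.map Prod.fst) :
    pvS l k = 0 := by
  apply List.sum_eq_zero
  intro x hx
  simp only [List.mem_map] at hx
  obtain ⟨e, he, rfl⟩ := hx
  have : e.1 ≠ k := fun hk => h (List.mem_map.mpr ⟨e, he, hk⟩)
  simp [this]

theorem pvOfList_append (ks : List String) (a : String) :
    PySem.Set.ofList (ks ++ [a]) = PySem.Set.add (PySem.Set.ofList ks) a := by
  rw [PySem.Set.ofList_eq_foldl, List.foldl_append, ← PySem.Set.ofList_eq_foldl]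
  rfl

theorem pvItems_dfold (evs : List (String × Int)) :
    (pvDfold evs).items =
      (PySem.Set.ofList (evs.map Prod.fst)).map
        (fun k => (k, [pvS evs k, ((evs.map Prod.fst).count k : Int)])) := by
  induction evs using List.reverseRecOn with
  | nil => rfl
  | append_singleton l e ih =>
    have hstep : pvDfold (l ++ [e]) = pvUpd (pvDfold l) e.1 e.2 := by
      unfold pvDfold
      rw [List.foldl_append]
      rfl
    have hkeys : (pvDfold l).keys = PySem.Set.ofList (l.map Prod.fst) := by
      show (pvDfold l).items.map Prod.fst = _
      rw [ih, List.map_map]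
      simp [Function.comp_def]
    have hnd : (pvDfold l).keys.Nodup := by
      rw [hkeys]; exact PySem.Set.nodup_ofList _
    simp only [List.map_append, List.map_cons, List.map_nil, pvOfList_append]
    by_cases hmem : e.1 ∈ l.map Prod.fst
    · have hmemset : e.1 ∈ PySem.Set.ofList (l.map Prod.fst) :=
        (PySem.Set.mem_ofList _ e.1).mpr hmem
      have hcont : (pvDfold l).contains e.1 = true :=
        (PySem.Dict.contains_iff_mem_keys _ e.1).mpr (by rw [hkeys]; exact hmemset)
      have hin : (e.1, [pvS l e.1, (((l.map Prod.fst).count e.1 : Nat) : Int)]) ∈ (pvDfold l).items := by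
        rw [ih]; exact List.mem_map.mpr ⟨e.1, hmemset, rfl⟩
      have hgetD := PySem.Dict.getD_of_mem_items _ hin hnd [0, 0]
      rw [hstep, pvUpd, hgetD]
      rw [PySem.Dict.items_insert_of_contains _ _ hcont, ih, List.map_map,
        PySem.Set.add, if_pos (by simpa using hmemset)]
      apply List.map_congr_left
      intro x hx
      by_cases hxk : x = e.1
      · subst hxk
        simp only [Function.comp_def, beq_self_eq_true, if_true]
        rw [pvS_append]
        simp [List.count_append, List.getD]
      · simp only [Function.comp_def, if_neg (show ¬((x == e.1) = true) by simpa using hxk)]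
        rw [pvS_append]
        have hne : e.1 ≠ x := fun h => hxk h.symm
        simp [hne, List.count_append]
    · have hcont : (pvDfold l).contains e.1 = false := by
        rw [← Bool.not_eq_true]
        intro hc
        exact hmem ((PySem.Set.mem_ofList _ e.1).mp
          (by rw [← hkeys]; exact (PySem.Dict.contains_iff_mem_keys _ e.1).mp hc))
      have hgetD : (pvDfold l).getD e.1 [0, 0] = [0, 0] :=
        PySem.Dict.getD_of_not_contains _ _ hcont
      rw [hstep, pvUpd, hgetD]
      rw [PySem.Dict.items_insert_of_not_contains _ _ hcont, ih,
        PySem.Set.add, if_neg (by simpa using hmem), List.map_append]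
      congr 1
      · apply List.map_congr_left
        intro x hx
        have hxks : x ∈ l.map Prod.fst := (PySem.Set.mem_ofList _ x).mp hx
        have hne : e.1 ≠ x := fun h => hmem (h ▸ hxks)
        rw [pvS_append]
        simp [hne, List.count_append]
      · rw [List.map_cons, List.map_nil, pvS_append, pvS_zero l e.1 hmem]
        simp [List.count_eq_zero_of_not_mem hmem, List.getD]

theorem pvWidths (m : List String) (h : Pre_get_measurements m) :
    ∀ i < m.length, pvW m i = pvW m 0 := by
  have hc := List.isChain_iff_getElem.mp h
  intro i
  induction i with
  | zero => intro _; rfl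
  | succ n ih =>
    intro hlt
    have h1 : pvW m (n + 1) = pvW m n := by
      unfold pvW
      rw [List.getD_eq_getElem _ _ (show n + 1 < m.length from hlt),
        List.getD_eq_getElem _ _ (show n < m.length by omega)]
      exact (hc n hlt).symm
    rw [h1, ih (by omega)]

def pvRS (n : Nat) (f : Nat → Int) : Int := ((List.range n).map f).sum

def pvGS (h w : Nat) (f : Nat → Nat → Int) : Int := pvRS h (fun i => pvRS w (f i))

theorem pvRS_congr {n : Nat} {f g : Nat → Int} (h : ∀ t < n, f t = g t) : pvRS n f = pvRS n g := by
  unfold pvRS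
  exact congrArg List.sum (List.map_congr_left (fun t ht => h t (List.mem_range.mp ht)))

theorem pvRS_zero (n : Nat) : pvRS n (fun _ => (0:Int)) = 0 := by simp [pvRS]

theorem pvRS_sub (n : Nat) (f g : Nat → Int) :
    pvRS n (fun t => f t - g t) = pvRS n f - pvRS n g := by
  induction n with
  | zero => rfl
  | succ m ih => simp only [pvRS, List.range_succ, List.map_append, List.sum_append] at ih ⊢; rw [ih]; simp; ring

theorem pvRS_mul (n : Nat) (c : Int) (f : Nat → Int) :
    pvRS n (fun t => c * f t) = c * pvRS n f := by
  induction n with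
  | zero => simp [pvRS]
  | succ m ih => simp only [pvRS, List.range_succ, List.map_append, List.sum_append] at ih ⊢; rw [ih]; simp; ring

theorem pvRS_head0 (n : Nat) (f : Nat → Int) (h0 : f 0 = 0) :
    pvRS n f = pvRS (n - 1) (fun t => f (t + 1)) := by
  cases n with
  | zero => rfl
  | succ m =>
    simp only [pvRS, List.range_succ_eq_map, List.map_cons, List.sum_cons, h0,
      List.map_map, Function.comp_def, Nat.succ_eq_add_one, Nat.add_sub_cancel, zero_add]

theorem pvRS_last0 (n : Nat) (f : Nat → Int) (h0 : f (n - 1) = 0) :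
    pvRS n f = pvRS (n - 1) f := by
  cases n with
  | zero => rfl
  | succ m =>
    simp only [Nat.add_sub_cancel] at h0 ⊢
    simp [pvRS, List.range_succ, h0]

theorem pvGS_congr {h w : Nat} {f g : Nat → Nat → Int} (hc : ∀ i < h, ∀ j < w, f i j = g i j) :
    pvGS h w f = pvGS h w g :=
  pvRS_congr (fun i hi => pvRS_congr (fun j hj => hc i hi j hj))

theorem pvGS_sub (h w : Nat) (f g : Nat → Nat → Int) :
    pvGS h w (fun i j => f i j - g i j) = pvGS h w f - pvGS h w g := by
  unfold pvGS
  rw [← pvRS_sub]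
  exact pvRS_congr (fun i _ => pvRS_sub w (f i) (g i))

theorem pvGS_mul (h w : Nat) (c : Int) (f : Nat → Nat → Int) :
    pvGS h w (fun i j => c * f i j) = c * pvGS h w f := by
  unfold pvGS
  rw [← pvRS_mul]
  exact pvRS_congr (fun i _ => pvRS_mul w c (f i))

theorem pvS_events (m : List String) (f : List String → Nat → Nat → Int) (k : String) :
    pvS (pvEvents m f) k =
      pvRS m.length (fun i => pvRS (pvW m i)
        (fun j => if String.ofList [pvA m i j] = k then f m i j else 0)) := by
  simp only [pvS, pvEvents, List.flatMap_def, List.map_flatten, List.sum_flatten,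
    List.map_map, Function.comp_def, pvRS]

-- indicator components of a cell's contribution to key k

def pvKk (m : List String) (k : String) (i j : Nat) : Int :=
  if String.ofList [pvA m i j] = k then 1 else 0

def pvCU (m : List String) (k : String) (i j : Nat) : Int :=
  if String.ofList [pvA m i j] = k ∧ ¬(i = 0 ∨ pvA m (i - 1) j ≠ pvA m i j) then 1 else 0

def pvCD (m : List String) (k : String) (i j : Nat) : Int :=
  if String.ofList [pvA m i j] = k ∧ ¬(i = m.length - 1 ∨ pvA m (i + 1) j ≠ pvA m i j) then 1 else 0

def pvCL (m : List String) (k : String) (i j : Nat) : Int :=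
  if String.ofList [pvA m i j] = k ∧ ¬(j = 0 ∨ pvA m i (j - 1) ≠ pvA m i j) then 1 else 0

def pvCR (m : List String) (k : String) (W i j : Nat) : Int :=
  if String.ofList [pvA m i j] = k ∧ ¬(j = W - 1 ∨ pvA m i (j + 1) ≠ pvA m i j) then 1 else 0

def pvBR (m : List String) (k : String) (W i j : Nat) : Int :=
  if String.ofList [pvA m i j] = k ∧ (j + 1 < W ∧ pvA m i (j + 1) = pvA m i j) then 1 else 0

def pvBD (m : List String) (k : String) (i j : Nat) : Int :=
  if String.ofList [pvA m i j] = k ∧ (i + 1 < m.length ∧ pvA m (i + 1) j = pvA m i j) then 1 else 0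

theorem pvIteNot (g : Prop) [Decidable g] : (if g then (1:Int) else 0) = 1 - (if ¬ g then 1 else 0) := by
  by_cases h : g <;> simp [h]

theorem pvIteTwo (g : Prop) [Decidable g] : (if g then (2:Int) else 0) = 2 * (if g then 1 else 0) := by
  by_cases h : g <;> simp [h]

theorem pvExpandA (m : List String) (k : String) (i j : Nat) (hWi : pvW m i = pvW m 0) :
    (if String.ofList [pvA m i j] = k then pvPerimA m i j else 0) =
      4 * pvKk m k i j - pvCU m k i j - pvCD m k i j - pvCL m k i j - pvCR m k (pvW m 0) i j := by
  unfold pvPerimA pvKk pvCU pvCD pvCL pvCR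
  rw [hWi]
  by_cases hK : String.ofList [pvA m i j] = k
  · simp only [hK, if_true, true_and]
    rw [pvIteNot (i = 0 ∨ pvA m (i - 1) j ≠ pvA m i j),
      pvIteNot (i = m.length - 1 ∨ pvA m (i + 1) j ≠ pvA m i j),
      pvIteNot (j = 0 ∨ pvA m i (j - 1) ≠ pvA m i j),
      pvIteNot (j = pvW m 0 - 1 ∨ pvA m i (j + 1) ≠ pvA m i j)]
    ring
  · simp [hK]

theorem pvExpandB (m : List String) (k : String) (i j : Nat) (hWi : pvW m i = pvW m 0) :
    (if String.ofList [pvA m i j] = k then pvDeltaB m i j else 0) =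
      4 * pvKk m k i j - 2 * pvBR m k (pvW m 0) i j - 2 * pvBD m k i j := by
  unfold pvDeltaB pvKk pvBR pvBD
  rw [hWi]
  by_cases hK : String.ofList [pvA m i j] = k
  · simp only [hK, if_true, true_and]
    rw [pvIteTwo (j + 1 < pvW m 0 ∧ pvA m i (j + 1) = pvA m i j),
      pvIteTwo (i + 1 < m.length ∧ pvA m (i + 1) j = pvA m i j)]
    ring
  · simp [hK]

theorem pvRowZeroU (m : List String) (k : String) (W : Nat) :
    pvRS W (pvCU m k 0) = 0 := by
  refine (pvRS_congr (fun j _ => ?_)).trans (pvRS_zero W)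
  unfold pvCU
  rw [if_neg]
  rintro ⟨_, hn⟩
  exact hn (Or.inl rfl)

theorem pvRowZeroD (m : List String) (k : String) (W : Nat) :
    pvRS W (pvCD m k (m.length - 1)) = 0 := by
  refine (pvRS_congr (fun j _ => ?_)).trans (pvRS_zero W)
  unfold pvCD
  rw [if_neg]
  rintro ⟨_, hn⟩
  exact hn (Or.inl rfl)

theorem pvShiftUD (m : List String) (k : String) :
    pvGS m.length (pvW m 0) (pvCU m k) = pvGS m.length (pvW m 0) (pvCD m k) := by
  unfold pvGS
  rw [pvRS_head0 m.length (fun i => pvRS (pvW m 0) (pvCU m k i)) (pvRowZeroU m k (pvW m 0)),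
    pvRS_last0 m.length (fun i => pvRS (pvW m 0) (pvCD m k i)) (pvRowZeroD m k (pvW m 0))]
  apply pvRS_congr
  intro t ht
  apply pvRS_congr
  intro j _
  unfold pvCU pvCD
  have hiff : (String.ofList [pvA m (t + 1) j] = k ∧ ¬(t + 1 = 0 ∨ pvA m (t + 1 - 1) j ≠ pvA m (t + 1) j))
      ↔ (String.ofList [pvA m t j] = k ∧ ¬(t = m.length - 1 ∨ pvA m (t + 1) j ≠ pvA m t j)) := by
    simp only [Nat.add_sub_cancel]
    constructor
    · rintro ⟨hk, hn⟩
      have he : pvA m t j = pvA m (t + 1) j := by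
        by_contra hne
        exact hn (Or.inr hne)
      refine ⟨by rw [he]; exact hk, ?_⟩
      rintro (h1 | h2)
      · omega
      · exact h2 he.symm
    · rintro ⟨hk, hn⟩
      have he : pvA m (t + 1) j = pvA m t j := by
        by_contra hne
        exact hn (Or.inr hne)
      refine ⟨by rw [he]; exact hk, ?_⟩
      rintro (h1 | h2)
      · omega
      · exact h2 he.symm
  simp only [hiff]

theorem pvShiftLR (m : List String) (k : String) :
    pvGS m.length (pvW m 0) (pvCL m k) = pvGS m.length (pvW m 0) (pvCR m k (pvW m 0)) := by
  unfold pvGS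
  apply pvRS_congr
  intro i _
  have hz1 : pvCL m k i 0 = 0 := by
    unfold pvCL
    rw [if_neg]
    rintro ⟨_, hn⟩
    exact hn (Or.inl rfl)
  have hz2 : pvCR m k (pvW m 0) i (pvW m 0 - 1) = 0 := by
    unfold pvCR
    rw [if_neg]
    rintro ⟨_, hn⟩
    exact hn (Or.inl rfl)
  rw [pvRS_head0 (pvW m 0) (pvCL m k i) hz1, pvRS_last0 (pvW m 0) (pvCR m k (pvW m 0) i) hz2]
  apply pvRS_congr
  intro t ht
  unfold pvCL pvCR
  have hiff : (String.ofList [pvA m i (t + 1)] = k ∧ ¬(t + 1 = 0 ∨ pvA m i (t + 1 - 1) ≠ pvA m i (t + 1)))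
      ↔ (String.ofList [pvA m i t] = k ∧ ¬(t = pvW m 0 - 1 ∨ pvA m i (t + 1) ≠ pvA m i t)) := by
    simp only [Nat.add_sub_cancel]
    constructor
    · rintro ⟨hk, hn⟩
      have he : pvA m i t = pvA m i (t + 1) := by
        by_contra hne
        exact hn (Or.inr hne)
      refine ⟨by rw [he]; exact hk, ?_⟩
      rintro (h1 | h2)
      · omega
      · exact h2 he.symm
    · rintro ⟨hk, hn⟩
      have he : pvA m i (t + 1) = pvA m i t := by
        by_contra hne
        exact hn (Or.inr hne)
      refine ⟨by rw [he]; exact hk, ?_⟩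
      rintro (h1 | h2)
      · omega
      · exact h2 he.symm
  simp only [hiff]

theorem pvRtoBR (m : List String) (k : String) :
    pvGS m.length (pvW m 0) (pvCR m k (pvW m 0)) = pvGS m.length (pvW m 0) (pvBR m k (pvW m 0)) := by
  apply pvGS_congr
  intro i _ j hj
  unfold pvCR pvBR
  have hiff : (String.ofList [pvA m i j] = k ∧ ¬(j = pvW m 0 - 1 ∨ pvA m i (j + 1) ≠ pvA m i j))
      ↔ (String.ofList [pvA m i j] = k ∧ (j + 1 < pvW m 0 ∧ pvA m i (j + 1) = pvA m i j)) := by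
    refine and_congr_right (fun _ => ?_)
    constructor
    · intro hn
      have he : pvA m i (j + 1) = pvA m i j := by
        by_contra hne
        exact hn (Or.inr hne)
      have hne : j ≠ pvW m 0 - 1 := fun h => hn (Or.inl h)
      exact ⟨by omega, he⟩
    · rintro ⟨h1, h2⟩ (h3 | h4)
      · omega
      · exact h4 h2
  simp only [hiff]

theorem pvDtoBD (m : List String) (k : String) :
    pvGS m.length (pvW m 0) (pvCD m k) = pvGS m.length (pvW m 0) (pvBD m k) := by
  apply pvGS_congr
  intro i hi j hj
  unfold pvCD pvBD
  have hiff : (String.ofList [pvA m i j] = k ∧ ¬(i = m.length - 1 ∨ pvA m (i + 1) j ≠ pvA m i j))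
      ↔ (String.ofList [pvA m i j] = k ∧ (i + 1 < m.length ∧ pvA m (i + 1) j = pvA m i j)) := by
    refine and_congr_right (fun _ => ?_)
    constructor
    · intro hn
      have he : pvA m (i + 1) j = pvA m i j := by
        by_contra hne
        exact hn (Or.inr hne)
      have hlt : i + 1 < m.length := by
        rcases Nat.lt_or_ge (i + 1) m.length with h | h
        · exact h
        · exact absurd (Or.inl (by omega)) hn
      exact ⟨hlt, he⟩
    · rintro ⟨h1, h3⟩
      rintro (h4 | h5)
      · omega
      · exact h5 h3
  simp only [hiff]

theorem pvSums_eq (m : List String) (hpre : Pre_get_measurements m) (k : String) :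
    pvS (pvEvents m pvPerimA) k = pvS (pvEvents m pvDeltaB) k := by
  have hW := pvWidths m hpre
  rw [pvS_events, pvS_events]
  have hA : pvRS m.length (fun i => pvRS (pvW m i)
        (fun j => if String.ofList [pvA m i j] = k then pvPerimA m i j else 0))
      = pvGS m.length (pvW m 0)
        (fun i j => if String.ofList [pvA m i j] = k then pvPerimA m i j else 0) := by
    unfold pvGS
    exact pvRS_congr (fun i hi => by rw [hW i hi])
  have hB : pvRS m.length (fun i => pvRS (pvW m i)
        (fun j => if String.ofList [pvA m i j] = k then pvDeltaB m i j else 0))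
      = pvGS m.length (pvW m 0)
        (fun i j => if String.ofList [pvA m i j] = k then pvDeltaB m i j else 0) := by
    unfold pvGS
    exact pvRS_congr (fun i hi => by rw [hW i hi])
  rw [hA, hB]
  rw [pvGS_congr (fun i hi j hj => pvExpandA m k i j (hW i hi)),
    pvGS_congr (fun i hi j hj => pvExpandB m k i j (hW i hi))]
  rw [pvGS_sub, pvGS_sub, pvGS_sub, pvGS_sub, pvGS_sub, pvGS_sub, pvGS_mul,
    pvGS_mul, pvGS_mul]
  have h1 := pvShiftUD m k
  have h2 := pvShiftLR m k
  have h3 := pvRtoBR m k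
  have h4 := pvDtoBD m k
  rw [h1, h2, h3, h4]
  ring

theorem pvKeys_eq (map : List String) :
    (pvEvents map pvPerimA).map Prod.fst = (pvEvents map pvDeltaB).map Prod.fst := by
  simp [pvEvents, List.map_flatMap, List.map_map, Function.comp_def]

-- ===== VERDICT (by name: the statement is the Claim_ definition above) =====
theorem get_measurements_spec : Claim_equal_get_measurements := by
  intro map _ hpre
  show get_measurements map = get_measurements_alt map
  rw [pvPortA_eq, pvPortB_eq, pvItems_dfold, pvItems_dfold, pvKeys_eq]
  exact List.map_congr_left (fun k _ => by rw [pvSums_eq map hpre k])
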